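-- pv_equiv track=rewrite | github.com/emilianstoyanov/Python-Tasks | minesweeper_game.py | solution
-- ===== SOURCE A (Python) =====
-- def solution(matrix):
--     r = []
--
--     for i in range(len(matrix)):
--         r.append([])
--         for j in range(len(matrix[0])):
--             l = -matrix[i][j]
--             for x in [-1, 0, 1]:
--                 for y in [-1, 0, 1]:
--                     if 0 <= i + x < len(matrix) and 0 <= j + y < len(matrix[0]):
--                         l += matrix[i + x][j + y]
--
--             r[i].append(l)
--     return r
-- ===== SOURCE B (Python) =====
-- def solution(matrix):
--     if not matrix:
--         return []
--     m, n = len(matrix), len(matrix[0])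
--     # 2D prefix-sum table: P[i][j] = sum of matrix[a][b] for a < i, b < j (first n columns).
--     P = [[0] * (n + 1)]
--     for row in matrix:
--         prev = P[-1]
--         cur = [0]
--         s = 0
--         for j in range(n):
--             s = s + row[j]
--             cur.append(prev[j + 1] + s)
--         P.append(cur)
--     out = []
--     for i in range(m):
--         r0, r1 = max(0, i - 1), min(m, i + 2)
--         row_i = matrix[i]
--         orow = []
--         for j in range(n):
--             c0, c1 = max(0, j - 1), min(n, j + 2)
--             orow.append(P[r1][c1] - P[r0][c1] - P[r1][c0] + P[r0][c0] - row_i[j])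
--         out.append(orow)
--     return out
-- ===== Notes on version B (the rewrite author's own statement) =====
-- stated objective: faster
-- what changed: Replaces the per-cell nine-offset bounds-checked scan with a staged algorithm: one pass builds a 2D prefix-sum table, then each cell's answer is a four-corner rectangle query over clamped bounds minus the cell itself.
import Mathlib
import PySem

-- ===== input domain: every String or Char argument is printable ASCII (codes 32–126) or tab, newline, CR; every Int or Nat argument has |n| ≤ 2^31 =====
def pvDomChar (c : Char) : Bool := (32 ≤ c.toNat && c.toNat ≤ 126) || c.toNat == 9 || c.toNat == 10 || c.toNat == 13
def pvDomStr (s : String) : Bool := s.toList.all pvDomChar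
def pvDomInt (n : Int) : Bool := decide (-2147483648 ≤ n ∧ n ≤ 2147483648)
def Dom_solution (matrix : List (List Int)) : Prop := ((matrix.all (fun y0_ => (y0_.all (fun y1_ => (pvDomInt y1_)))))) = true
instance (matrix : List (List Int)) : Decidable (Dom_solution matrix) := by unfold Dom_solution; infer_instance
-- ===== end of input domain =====

-- B replaces the per-cell nine-offset bounds-checked scan with a staged algorithm: a 2D prefix-sum
-- table built in one pass, then a four-corner rectangle query per cell (measured faster by a constant factor).
-- ===== PORT A =====
-- Port of A: triple-nested loops; cells appended one by one, neighbor bounds checked per offset.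
def solution (matrix : List (List Int)) : List (List Int) :=
  (PySem.List.pyRange 0 (matrix.length : Int) 1).foldl
    (fun r i =>
      r ++ [(PySem.List.pyRange 0 ((matrix.headD []).length : Int) 1).foldl
        (fun acc j =>
          acc ++ [(([-1, 0, 1] : List Int).foldl
            (fun l x =>
              (([-1, 0, 1] : List Int).foldl
                (fun l y =>
                  if 0 ≤ i + x ∧ i + x < (matrix.length : Int) ∧ 0 ≤ j + y ∧ j + y < ((matrix.headD []).length : Int) then
                    l + PySem.List.pyGetD (PySem.List.pyGetD matrix (i + x) []) (j + y) 0
                  else l)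
                l))
            (-(PySem.List.pyGetD (PySem.List.pyGetD matrix i []) j 0)))])
        []])
    []

-- ===== PORT B =====
-- Port of B: build a 2D prefix-sum table P row by row (each prefix row = previous prefix row plus a
-- running sum of the current data row), then answer each cell by a four-corner rectangle query on P.
-- (Python's P[-1] on the nonempty accumulated table is ported as getLastD.)
def solution_alt (matrix : List (List Int)) : List (List Int) :=
  if matrix = [] then []
  else
    let m : Int := matrix.length
    let n : Int := (matrix.headD []).length
    let P : List (List Int) := matrix.foldl
      (fun P row =>
        let prev := P.getLastD []
        let cur := ((PySem.List.pyRange 0 n 1).foldl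
          (fun (cs : List Int × Int) j =>
            let s := cs.2 + PySem.List.pyGetD row j 0
            (cs.1 ++ [PySem.List.pyGetD prev (j + 1) 0 + s], s))
          ([0], 0)).1
        P ++ [cur])
      [List.replicate ((matrix.headD []).length + 1) 0]
    (PySem.List.pyRange 0 m 1).map (fun i =>
      let r0 := max 0 (i - 1); let r1 := min m (i + 2)
      let rowi := PySem.List.pyGetD matrix i []
      (PySem.List.pyRange 0 n 1).map (fun j =>
        let c0 := max 0 (j - 1); let c1 := min n (j + 2)
        PySem.List.pyGetD (PySem.List.pyGetD P r1 []) c1 0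
          - PySem.List.pyGetD (PySem.List.pyGetD P r0 []) c1 0
          - PySem.List.pyGetD (PySem.List.pyGetD P r1 []) c0 0
          + PySem.List.pyGetD (PySem.List.pyGetD P r0 []) c0 0
          - PySem.List.pyGetD rowi j 0))

-- ===== PRECONDITION & SPEC =====
-- Pre_ excludes jagged matrices in which some row is shorter than the first row: there the Python A raises IndexError.
def Pre_solution (matrix : List (List Int)) : Prop :=
  ∀ row ∈ matrix, (matrix.headD []).length ≤ row.length
instance (matrix : List (List Int)) : Decidable (Pre_solution matrix) := by unfold Pre_solution; infer_instance
def pvWitness_solution : List (List Int) := [[1, 2], [3, 4]]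
def Spec_solution (matrix : List (List Int)) (out : List (List Int)) : Prop := out = solution_alt matrix
instance (matrix : List (List Int)) (out : List (List Int)) : Decidable (Spec_solution matrix out) := by unfold Spec_solution; infer_instance

-- ===== CLAIM (what is proved, stated in full; the proofs are below) =====
def Claim_equal_solution : Prop := ∀ (matrix : List (List Int)), Dom_solution matrix → Pre_solution matrix → Spec_solution matrix (solution matrix)

-- ===== LEMMAS AND PROOFS =====

-- prefix sums (proof-side abbreviations): rowS r j = sum of the first j entries of r (default 0),
-- S xs i j = sum of the top-left i×j rectangle of xs.
def rowS (r : List Int) (j : Nat) : Int := ((List.range j).map (fun b => r.getD b 0)).sum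
def S (xs : List (List Int)) (i j : Nat) : Int := ((List.range i).map (fun a => rowS (xs.getD a []) j)).sum

theorem sum_map_sub (k : Nat) (f g : Nat → Int) :
    ((List.range k).map (fun t => f t - g t)).sum = ((List.range k).map f).sum - ((List.range k).map g).sum := by
  induction k with
  | zero => simp
  | succ k ih => simp [List.range_succ, ih]; ring

theorem range_sum_split (a b : Nat) (h : a ≤ b) (f : Nat → Int) :
    ((List.range b).map f).sum = ((List.range a).map f).sum + ((List.range (b - a)).map (fun t => f (a + t))).sum := by
  have hb : b = a + (b - a) := by omega
  rw [hb, List.range_add]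
  simp [List.map_map, Function.comp_def]

theorem ifadd (c : Prop) [Decidable c] (l t : Int) :
    (if c then l + t else l) = l + (if c then t else 0) := by split <;> simp

theorem ite_merge (p q : Prop) [Decidable p] [Decidable q] (a : Int) :
    (if p then (if q then a else 0) else 0) = if p ∧ q then a else 0 := by
  by_cases p <;> by_cases q <;> simp_all

theorem ite_distrib3 (p : Prop) [Decidable p] (a b c : Int) :
    (if p then a + b + c else 0) = (if p then a else 0) + (if p then b else 0) + (if p then c else 0) := by
  split <;> simp

-- clamped 3-window: summing G over the clamped index window [i-1, min m (i+2)) equals the three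
-- bounds-checked offset terms G(i-1), G(i), G(i+1).
theorem clampWin (m i : Nat) (hi : i < m) (G : Int → Int) :
    ((List.range (min m (i + 2) - (i - 1))).map (fun t => G ((i - 1 + t : Nat) : Int))).sum
      = (if 0 ≤ (i : Int) + -1 ∧ (i : Int) + -1 < (m : Int) then G ((i : Int) + -1) else 0)
        + (if 0 ≤ (i : Int) + 0 ∧ (i : Int) + 0 < (m : Int) then G ((i : Int) + 0) else 0)
        + (if 0 ≤ (i : Int) + 1 ∧ (i : Int) + 1 < (m : Int) then G ((i : Int) + 1) else 0) := by
  by_cases h1 : 1 ≤ i <;> by_cases h2 : i + 1 < m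
  · have hk : min m (i + 2) - (i - 1) = 3 := by omega
    rw [hk, if_pos (by constructor <;> omega), if_pos (by constructor <;> omega), if_pos (by constructor <;> omega)]
    have c1 : ((i : Int) + -1) = ((i - 1 + 0 : Nat) : Int) := by omega
    have c2 : ((i : Int) + 0) = ((i - 1 + 1 : Nat) : Int) := by omega
    have c3 : ((i : Int) + 1) = ((i - 1 + 2 : Nat) : Int) := by omega
    rw [c1, c2, c3]; simp [List.range_succ]; ring
  · have hk : min m (i + 2) - (i - 1) = 2 := by omega
    rw [hk, if_pos (by constructor <;> omega), if_pos (by constructor <;> omega), if_neg (by omega)]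
    have c1 : ((i : Int) + -1) = ((i - 1 + 0 : Nat) : Int) := by omega
    have c2 : ((i : Int) + 0) = ((i - 1 + 1 : Nat) : Int) := by omega
    rw [c1, c2]; simp [List.range_succ]
  · have hk : min m (i + 2) - (i - 1) = 2 := by omega
    rw [hk, if_neg (by omega), if_pos (by constructor <;> omega), if_pos (by constructor <;> omega)]
    have c2 : ((i : Int) + 0) = ((i - 1 + 0 : Nat) : Int) := by omega
    have c3 : ((i : Int) + 1) = ((i - 1 + 1 : Nat) : Int) := by omega
    rw [c2, c3]; simp [List.range_succ]
  · have hk : min m (i + 2) - (i - 1) = 1 := by omega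
    rw [hk, if_neg (by omega), if_pos (by constructor <;> omega), if_neg (by omega)]
    have c2 : ((i : Int) + 0) = ((i - 1 + 0 : Nat) : Int) := by omega
    rw [c2]; simp [List.range_succ]

-- the inner loop of B's table construction: after k steps the pair is (the first k+1 prefix entries, the running row sum).
theorem inner_eq (p r : List Int) (k : Nat) :
    (PySem.List.pyRange 0 (k : Int) 1).foldl
      (fun (cs : List Int × Int) j =>
        (cs.1 ++ [PySem.List.pyGetD p (j + 1) 0 + (cs.2 + PySem.List.pyGetD r j 0)], cs.2 + PySem.List.pyGetD r j 0))
      ([0], 0)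
    = ((List.range (k + 1)).map (fun j => if j = 0 then 0 else p.getD j 0 + rowS r j), rowS r k) := by
  induction k with
  | zero => simp [rowS, PySem.List.pyRange]
  | succ k ih =>
    have h2 : PySem.List.pyRange 0 ((k : Int) + 1) 1 = PySem.List.pyRange 0 (k : Int) 1 ++ [(k : Int)] :=
      PySem.List.pyRange_one_succ_right (by positivity)
    rw [show (((k + 1 : Nat) : Int)) = (k : Int) + 1 by push_cast; ring, h2, List.foldl_append, ih]
    simp only [List.foldl_cons, List.foldl_nil]
    have hs : rowS r k + PySem.List.pyGetD r (k : Int) 0 = rowS r (k + 1) := by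
      simp [rowS, List.range_succ]
    have hp : PySem.List.pyGetD p ((k : Int) + 1) 0 = p.getD (k + 1) 0 := by
      rw [show ((k : Int) + 1) = ((k + 1 : Nat) : Int) by push_cast; ring, PySem.List.pyGetD_natCast]
    rw [hs, hp]
    simp [List.range_succ]

theorem outer_eq (rows : List (List Int)) (n : Nat) :
    rows.foldl
      (fun P row =>
        P ++ [((PySem.List.pyRange 0 (n : Int) 1).foldl
          (fun (cs : List Int × Int) j =>
            (cs.1 ++ [PySem.List.pyGetD (P.getLastD []) (j + 1) 0 + (cs.2 + PySem.List.pyGetD row j 0)],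
             cs.2 + PySem.List.pyGetD row j 0))
          ([0], 0)).1])
      [List.replicate (n + 1) 0]
    = (List.range (rows.length + 1)).map (fun i => (List.range (n + 1)).map (fun j => S rows i j)) := by
  induction rows using List.reverseRecOn with
  | nil => simp [S]
  | append_singleton rows r ih =>
    rw [List.foldl_append, ih]
    simp only [List.foldl_cons, List.foldl_nil]
    -- getLastD of the mapped table is the last prefix row
    have hlast : ∀ (f : Nat → List Int) (L : Nat), ((List.range (L + 1)).map f).getLastD [] = f L := by
      intro f L
      rw [List.range_succ, List.map_append]
      exact List.getLastD_concat
    rw [hlast, inner_eq]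
    have hSa : ∀ i ≤ rows.length, ∀ j, S (rows ++ [r]) i j = S rows i j := by
      intro i hi j
      unfold S
      apply congrArg
      apply List.map_congr_left
      intro a ha
      have : a < rows.length := by have := List.mem_range.mp ha; omega
      rw [List.getD_append _ _ _ _ this]
    have hlen : (rows ++ [r]).length = rows.length + 1 := by simp
    rw [hlen]
    rw [List.range_succ (n := rows.length + 1), List.map_append]
    congr 1
    · -- old rows unchanged
      apply List.map_congr_left
      intro i hi
      apply List.map_congr_left
      intro j hj
      exact (hSa i (by have := List.mem_range.mp hi; omega) j).symm
    · -- the new prefix row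
      simp only [List.map_cons, List.map_nil]
      congr 1
      apply List.map_congr_left
      intro j hj
      have hget : (rows ++ [r]).getD rows.length [] = r := by
        simp [List.getD]
      by_cases hj0 : j = 0
      · subst hj0
        simp [S, rowS]
      · rw [if_neg hj0]
        have hjn : j < n + 1 := List.mem_range.mp hj
        rw [PySem.List.getD_map_range _ _ _ _ hjn]
        unfold S
        rw [List.range_succ, List.map_append]
        simp only [List.sum_append, List.map_cons, List.map_nil, List.sum_cons, List.sum_nil]
        rw [hget]
        have : ∀ a ∈ List.range rows.length, rowS ((rows ++ [r]).getD a []) j = rowS (rows.getD a []) j := by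
          intro a ha
          rw [List.getD_append _ _ _ _ (List.mem_range.mp ha)]
        rw [List.map_congr_left this]
        ring

theorem rowS_window (r : List Int) (b0 b1 : Nat) (h : b0 ≤ b1) :
    rowS r b1 - rowS r b0 = ((List.range (b1 - b0)).map (fun u => r.getD (b0 + u) 0)).sum := by
  rw [rowS, rowS, range_sum_split b0 b1 h]; ring


-- the clamped column window of row z, and its expansion into three bounds-checked terms
def colW (matrix : List (List Int)) (n j : Nat) (z : Int) : Int :=
  ((List.range (min n (j + 2) - (j - 1))).map (fun u => (PySem.List.pyGetD matrix z []).getD (j - 1 + u) 0)).sum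

def colIfs (matrix : List (List Int)) (n j : Nat) (z : Int) : Int :=
  (if 0 ≤ (j : Int) + -1 ∧ (j : Int) + -1 < (n : Int) then PySem.List.pyGetD (PySem.List.pyGetD matrix z []) ((j : Int) + -1) 0 else 0)
    + (if 0 ≤ (j : Int) + 0 ∧ (j : Int) + 0 < (n : Int) then PySem.List.pyGetD (PySem.List.pyGetD matrix z []) ((j : Int) + 0) 0 else 0)
    + (if 0 ≤ (j : Int) + 1 ∧ (j : Int) + 1 < (n : Int) then PySem.List.pyGetD (PySem.List.pyGetD matrix z []) ((j : Int) + 1) 0 else 0)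

theorem colW_eq (matrix : List (List Int)) (n j : Nat) (z : Int) (hj : j < n) :
    colW matrix n j z = colIfs matrix n j z := by
  have h := clampWin n j hj (fun w => PySem.List.pyGetD (PySem.List.pyGetD matrix z []) w 0)
  unfold colW colIfs
  rw [← h]
  apply congrArg
  apply List.map_congr_left
  intro u _
  exact (PySem.List.pyGetD_natCast _ _ _).symm

theorem solution_eq_alt : ∀ (matrix : List (List Int)), solution matrix = solution_alt matrix := by
  intro matrix
  by_cases hm0 : matrix = []
  · subst hm0; rfl
  · simp only [solution_alt, if_neg hm0]
    rw [outer_eq]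
    simp only [solution, PySem.List.foldl_append_singleton_eq_map, List.nil_append,
      PySem.List.pyRange_zero_natCast, List.map_map]
    apply List.map_congr_left
    intro i hi0
    have hi : i < matrix.length := List.mem_range.mp hi0
    simp only [Function.comp_apply]
    apply List.map_congr_left
    intro j hj0
    have hj : j < (matrix.headD []).length := List.mem_range.mp hj0
    simp only [Function.comp_apply]
    -- normalize the Nat-side clamped bounds
    have ea0 : max 0 ((i : Int) - 1) = ((i - 1 : Nat) : Int) := by omega
    have ea1 : min (matrix.length : Int) ((i : Int) + 2) = ((min matrix.length (i + 2) : Nat) : Int) := by omega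
    have eb0 : max 0 ((j : Int) - 1) = ((j - 1 : Nat) : Int) := by omega
    have eb1 : min ((matrix.headD []).length : Int) ((j : Int) + 2) = ((min (matrix.headD []).length (j + 2) : Nat) : Int) := by omega
    rw [ea0, ea1, eb0, eb1]
    simp only [PySem.List.pyGetD_natCast]
    have hT : ∀ (a b : Nat), a ≤ matrix.length → b ≤ (matrix.headD []).length →
        (((List.range (matrix.length + 1)).map
            (fun i => (List.range ((matrix.headD []).length + 1)).map (fun j => S matrix i j))).getD a []).getD b 0
          = S matrix a b := by
      intro a b ha hb
      rw [PySem.List.getD_map_range _ _ _ _ (by omega), PySem.List.getD_map_range _ _ _ _ (by omega)]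
    rw [hT (min matrix.length (i + 2)) (min (matrix.headD []).length (j + 2)) (by omega) (by omega),
        hT (i - 1) (min (matrix.headD []).length (j + 2)) (by omega) (by omega),
        hT (min matrix.length (i + 2)) (j - 1) (by omega) (by omega),
        hT (i - 1) (j - 1) (by omega) (by omega)]
    -- B's rectangle query, rewritten into the three-by-three bounds-checked window
    have hSsplit : ∀ jj : Nat,
        S matrix (min matrix.length (i + 2)) jj - S matrix (i - 1) jj
          = ((List.range (min matrix.length (i + 2) - (i - 1))).map
              (fun t => rowS (matrix.getD (i - 1 + t) []) jj)).sum := by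
      intro jj
      rw [S, S, range_sum_split (i - 1) (min matrix.length (i + 2)) (by omega)]
      ring
    have hB : S matrix (min matrix.length (i + 2)) (min ((matrix.headD []).length) (j + 2))
            - S matrix (i - 1) (min ((matrix.headD []).length) (j + 2))
            - S matrix (min matrix.length (i + 2)) (j - 1)
            + S matrix (i - 1) (j - 1)
        = (if 0 ≤ (i : Int) + -1 ∧ (i : Int) + -1 < (matrix.length : Int) then colIfs matrix ((matrix.headD []).length) j ((i : Int) + -1) else 0)
          + (if 0 ≤ (i : Int) + 0 ∧ (i : Int) + 0 < (matrix.length : Int) then colIfs matrix ((matrix.headD []).length) j ((i : Int) + 0) else 0)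
          + (if 0 ≤ (i : Int) + 1 ∧ (i : Int) + 1 < (matrix.length : Int) then colIfs matrix ((matrix.headD []).length) j ((i : Int) + 1) else 0) := by
      calc S matrix (min matrix.length (i + 2)) (min ((matrix.headD []).length) (j + 2))
            - S matrix (i - 1) (min ((matrix.headD []).length) (j + 2))
            - S matrix (min matrix.length (i + 2)) (j - 1)
            + S matrix (i - 1) (j - 1)
          = (S matrix (min matrix.length (i + 2)) (min ((matrix.headD []).length) (j + 2))
              - S matrix (i - 1) (min ((matrix.headD []).length) (j + 2)))
            - (S matrix (min matrix.length (i + 2)) (j - 1) - S matrix (i - 1) (j - 1)) := by ring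
        _ = ((List.range (min matrix.length (i + 2) - (i - 1))).map
              (fun t => rowS (matrix.getD (i - 1 + t) []) (min ((matrix.headD []).length) (j + 2))
                - rowS (matrix.getD (i - 1 + t) []) (j - 1))).sum := by
            rw [hSsplit, hSsplit, sum_map_sub]
        _ = ((List.range (min matrix.length (i + 2) - (i - 1))).map
              (fun t => colW matrix ((matrix.headD []).length) j ((i - 1 + t : Nat) : Int))).sum := by
            apply congrArg
            apply List.map_congr_left
            intro t _
            rw [rowS_window _ _ _ (by omega)]
            unfold colW
            apply congrArg
            apply List.map_congr_left
            intro u _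
            rw [PySem.List.pyGetD_natCast]
        _ = ((List.range (min matrix.length (i + 2) - (i - 1))).map
              (fun t => colIfs matrix ((matrix.headD []).length) j ((i - 1 + t : Nat) : Int))).sum := by
            apply congrArg
            apply List.map_congr_left
            intro t _
            exact colW_eq _ _ _ _ hj
        _ = _ := clampWin matrix.length i hi (colIfs matrix ((matrix.headD []).length) j)
    rw [hB]
    simp only [List.foldl_cons, List.foldl_nil, ifadd, colIfs, ite_distrib3, ite_merge, and_assoc]
    ring

-- ===== VERDICT (by name: the statement is the Claim_ definition above) =====
theorem solution_spec : Claim_equal_solution := by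
  intro matrix _ _
  unfold Spec_solution
  exact solution_eq_alt matrix
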